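-- pv_equiv track=rewrite | github.com/damiraitbay/hood_de | backend/app/facebook_feed/endpoints.py | _normalize_age_group
-- ===== SOURCE A (Python) =====
-- def _normalize_age_group(raw_value: str) -> str:
--     text = str(raw_value or "").strip().lower()
--     if not text:
--         return ""
--     if any(token in text for token in ("adult", "erwachsene")):
--         return "adult"
--     if any(token in text for token in ("all ages", "alle")):
--         return "all ages"
--     if any(token in text for token in ("infant", "baby")):
--         return "infant"
--     if "newborn" in text:
--         return "newborn"
--     if "toddler" in text:
--         return "toddler"
--     if any(token in text for token in ("kids", "kinder")):
--         return "kids"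
--     if any(token in text for token in ("teen", "jugend")):
--         return "teen"
--     return ""
-- ===== SOURCE B (Python) =====
-- _KEYWORDS = {
--     "adult": "adult", "erwachsene": "adult",
--     "all ages": "all ages", "alle": "all ages",
--     "infant": "infant", "baby": "infant",
--     "newborn": "newborn",
--     "toddler": "toddler",
--     "kids": "kids", "kinder": "kids",
--     "teen": "teen", "jugend": "teen",
-- }
-- _PRIORITY = ("adult", "all ages", "infant", "newborn", "toddler", "kids", "teen")
--
--
-- def _normalize_age_group(raw_value: str) -> str:
--     text = str(raw_value or "").strip().lower()
--     found = set()
--     for i in range(len(text)):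
--         for keyword, label in _KEYWORDS.items():
--             if text.startswith(keyword, i):
--                 found.add(label)
--     for label in _PRIORITY:
--         if label in found:
--             return label
--     return ""
-- ===== Notes on version B (the rewrite author's own statement) =====
-- stated objective: alternative
-- what changed: Instead of testing each keyword group with a substring membership cascade, B scans the text left-to-right once, collects the set of all age-group labels whose keyword starts at each position, and then resolves the set by the fixed priority order.
import Mathlib
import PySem

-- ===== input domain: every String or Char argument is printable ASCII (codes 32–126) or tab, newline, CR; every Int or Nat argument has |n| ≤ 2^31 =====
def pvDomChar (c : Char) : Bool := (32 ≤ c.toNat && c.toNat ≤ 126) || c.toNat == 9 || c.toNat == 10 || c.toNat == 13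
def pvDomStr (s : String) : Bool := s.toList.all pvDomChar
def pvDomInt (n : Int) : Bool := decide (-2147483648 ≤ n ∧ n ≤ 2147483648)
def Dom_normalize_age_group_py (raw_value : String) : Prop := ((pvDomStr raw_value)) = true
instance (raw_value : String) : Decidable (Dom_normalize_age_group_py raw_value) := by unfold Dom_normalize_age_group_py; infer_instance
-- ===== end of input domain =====

-- B replaces A's seven-branch substring cascade by a single left-to-right scan collecting
-- the set of labels whose keyword starts at each position, then a priority lookup (alternative, same cost).


-- ===== PORT A =====
def normalize_age_group_py (raw_value : String) : String :=
  let text := PySem.Str.lower (PySem.Str.strip raw_value)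
  if text = "" then ""
  else if ["adult", "erwachsene"].any (fun t => PySem.Str.isIn t text) then "adult"
  else if ["all ages", "alle"].any (fun t => PySem.Str.isIn t text) then "all ages"
  else if ["infant", "baby"].any (fun t => PySem.Str.isIn t text) then "infant"
  else if PySem.Str.isIn "newborn" text then "newborn"
  else if PySem.Str.isIn "toddler" text then "toddler"
  else if ["kids", "kinder"].any (fun t => PySem.Str.isIn t text) then "kids"
  else if ["teen", "jugend"].any (fun t => PySem.Str.isIn t text) then "teen"
  else ""

-- ===== PORT B =====
-- the _KEYWORDS dict (keyword → label), in insertion order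
def pvKeywords : List (String × String) :=
  [("adult", "adult"), ("erwachsene", "adult"),
   ("all ages", "all ages"), ("alle", "all ages"),
   ("infant", "infant"), ("baby", "infant"),
   ("newborn", "newborn"),
   ("toddler", "toddler"),
   ("kids", "kids"), ("kinder", "kids"),
   ("teen", "teen"), ("jugend", "teen")]

def pvPriority : List String :=
  ["adult", "all ages", "infant", "newborn", "toddler", "kids", "teen"]

-- the scan: for i in range(len(text)): for keyword, label in _KEYWORDS.items(): if text.startswith(keyword, i): found.add(label)
def pvScan (cs : List Char) : PySem.Set String :=
  (List.range cs.length).foldl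
    (fun found i =>
      pvKeywords.foldl
        (fun found kv =>
          if PySem.Chars.startswith (cs.drop i) kv.1.toList then PySem.Set.add found kv.2
          else found)
        found)
    PySem.Set.empty

-- for label in _PRIORITY: if label in found: return label / return ""
def pvPick (found : PySem.Set String) : List String → String
  | [] => ""
  | l :: rest => if PySem.Set.contains found l then l else pvPick found rest

def normalize_age_group_py_alt (raw_value : String) : String :=
  let text := PySem.Str.lower (PySem.Str.strip raw_value)
  pvPick (pvScan text.toList) pvPriority

-- ===== PRECONDITION & SPEC =====
def Spec_normalize_age_group_py (raw_value : String) (out : String) : Prop := out = normalize_age_group_py_alt raw_value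
instance (raw_value : String) (out : String) : Decidable (Spec_normalize_age_group_py raw_value out) := by unfold Spec_normalize_age_group_py; infer_instance

-- ===== CLAIM =====
def Claim_equal_normalize_age_group_py : Prop := ∀ (raw_value : String), Dom_normalize_age_group_py raw_value → Spec_normalize_age_group_py raw_value (normalize_age_group_py raw_value)

-- ===== LEMMAS AND PROOFS =====

-- membership in a fold that conditionally adds to a set
theorem mem_foldl_add_if {α β : Type} [BEq α] [LawfulBEq α]
    (l : List β) (p : β → Bool) (f : β → α) (s : PySem.Set α) (x : α) :
    x ∈ l.foldl (fun s b => if p b then PySem.Set.add s (f b) else s) s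
    ↔ x ∈ s ∨ ∃ b ∈ l, p b = true ∧ f b = x := by
  induction l generalizing s with
  | nil => simp
  | cons b l ih =>
    simp only [List.foldl_cons, List.mem_cons, ih]
    by_cases hb : p b = true
    · rw [if_pos hb]
      simp only [PySem.Set.mem_add]
      constructor
      · rintro ((hs | hy) | ⟨b', hb', hp, hf⟩)
        · exact Or.inl hs
        · exact Or.inr ⟨b, Or.inl rfl, hb, hy.symm⟩
        · exact Or.inr ⟨b', Or.inr hb', hp, hf⟩
      · rintro (hs | ⟨b', (rfl | hb'), hp, hf⟩)
        · exact Or.inl (Or.inl hs)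
        · exact Or.inl (Or.inr hf.symm)
        · exact Or.inr ⟨b', hb', hp, hf⟩
    · rw [if_neg hb]
      constructor
      · rintro (hs | ⟨b', hb', hp, hf⟩)
        · exact Or.inl hs
        · exact Or.inr ⟨b', Or.inr hb', hp, hf⟩
      · rintro (hs | ⟨b', (rfl | hb'), hp, hf⟩)
        · exact Or.inl hs
        · exact absurd hp hb
        · exact Or.inr ⟨b', hb', hp, hf⟩

-- membership in the outer fold over positions
theorem mem_outer_fold (cs : List Char) (l : List Nat) (s : PySem.Set String) (x : String) :
    x ∈ l.foldl
      (fun found i =>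
        pvKeywords.foldl
          (fun found kv =>
            if PySem.Chars.startswith (cs.drop i) kv.1.toList then PySem.Set.add found kv.2
            else found) found) s
    ↔ x ∈ s ∨ ∃ i ∈ l, ∃ kv ∈ pvKeywords,
        PySem.Chars.startswith (cs.drop i) kv.1.toList = true ∧ kv.2 = x := by
  induction l generalizing s with
  | nil => simp
  | cons i l ih =>
    simp only [List.foldl_cons, List.mem_cons, ih, mem_foldl_add_if]
    constructor
    · rintro ((hs | ⟨kv, hkv, hp, hx⟩) | ⟨i', hi', kv, hkv, hp, hx⟩)
      · exact Or.inl hs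
      · exact Or.inr ⟨i, Or.inl rfl, kv, hkv, hp, hx⟩
      · exact Or.inr ⟨i', Or.inr hi', kv, hkv, hp, hx⟩
    · rintro (hs | ⟨i', (rfl | hi'), kv, hkv, hp, hx⟩)
      · exact Or.inl (Or.inl hs)
      · exact Or.inl (Or.inr ⟨kv, hkv, hp, hx⟩)
      · exact Or.inr ⟨i', hi', kv, hkv, hp, hx⟩

-- a nonempty keyword starts at some position i < length iff it occurs as a substring
theorem exists_mem_range_prefix_iff_isIn (kw cs : List Char) (h : kw ≠ []) :
    (∃ i ∈ List.range cs.length, kw <+: cs.drop i) ↔ PySem.Chars.isIn kw cs = true := by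
  rw [← PySem.Chars.exists_prefix_drop_iff_isIn]
  constructor
  · rintro ⟨i, _, hp⟩; exact ⟨i, hp⟩
  · rintro ⟨j, hp⟩
    by_cases hj : j < cs.length
    · exact ⟨j, List.mem_range.mpr hj, hp⟩
    · exfalso
      have : cs.drop j = [] := List.drop_eq_nil_of_le (le_of_not_gt hj)
      rw [this] at hp
      exact h (List.prefix_nil.mp hp)

-- membership in pvScan: x is collected iff some table keyword with label x occurs in cs
theorem mem_pvScan (cs : List Char) (x : String) :
    x ∈ pvScan cs ↔ ∃ kv ∈ pvKeywords, PySem.Chars.isIn kv.1.toList cs = true ∧ kv.2 = x := by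
  unfold pvScan
  rw [mem_outer_fold]
  simp only [PySem.Set.empty, List.not_mem_nil, false_or, List.mem_range,
    PySem.Chars.startswith_iff]
  constructor
  · rintro ⟨i, hi, kv, hkv, hp, hx⟩
    refine ⟨kv, hkv, ?_, hx⟩
    exact (exists_mem_range_prefix_iff_isIn kv.1.toList cs (by
      fin_cases hkv <;> decide)).mp ⟨i, List.mem_range.mpr hi, hp⟩
  · rintro ⟨kv, hkv, hin, hx⟩
    obtain ⟨i, hi, hp⟩ := (exists_mem_range_prefix_iff_isIn kv.1.toList cs (by
      fin_cases hkv <;> decide)).mpr hin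
    exact ⟨i, List.mem_range.mp hi, kv, hkv, hp, hx⟩

theorem contains_pvScan (cs : List Char) (x : String) :
    PySem.Set.contains (pvScan cs) x =
      pvKeywords.any (fun kv => kv.2 == x && PySem.Chars.isIn kv.1.toList cs) := by
  rw [Bool.eq_iff_iff]
  simp only [PySem.Set.contains_iff, mem_pvScan, List.any_eq_true, Bool.and_eq_true, beq_iff_eq]
  constructor
  · rintro ⟨kv, hkv, hin, hx⟩; exact ⟨kv, hkv, hx, hin⟩
  · rintro ⟨kv, hkv, hx, hin⟩; exact ⟨kv, hkv, hin, hx⟩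

-- ===== VERDICT =====
theorem normalize_age_group_py_spec : Claim_equal_normalize_age_group_py := by
  intro raw_value _
  unfold Spec_normalize_age_group_py normalize_age_group_py normalize_age_group_py_alt
  simp only []
  set text := PySem.Str.lower (PySem.Str.strip raw_value) with htext
  simp only [pvPriority, pvPick, contains_pvScan, pvKeywords, List.any_cons, List.any_nil,
    PySem.Str.isIn_eq, Bool.or_false]
  simp only [show (("adult":String) == "adult") = true from rfl,
    show (("all ages":String) == "adult") = false from rfl,
    show (("infant":String) == "adult") = false from rfl,
    show (("newborn":String) == "adult") = false from rfl,
    show (("toddler":String) == "adult") = false from rfl,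
    show (("kids":String) == "adult") = false from rfl,
    show (("teen":String) == "adult") = false from rfl,
    show (("adult":String) == "all ages") = false from rfl,
    show (("all ages":String) == "all ages") = true from rfl,
    show (("infant":String) == "all ages") = false from rfl,
    show (("newborn":String) == "all ages") = false from rfl,
    show (("toddler":String) == "all ages") = false from rfl,
    show (("kids":String) == "all ages") = false from rfl,
    show (("teen":String) == "all ages") = false from rfl,
    show (("adult":String) == "infant") = false from rfl,
    show (("all ages":String) == "infant") = false from rfl,
    show (("infant":String) == "infant") = true from rfl,
    show (("newborn":String) == "infant") = false from rfl,
    show (("toddler":String) == "infant") = false from rfl,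
    show (("kids":String) == "infant") = false from rfl,
    show (("teen":String) == "infant") = false from rfl,
    show (("adult":String) == "newborn") = false from rfl,
    show (("all ages":String) == "newborn") = false from rfl,
    show (("infant":String) == "newborn") = false from rfl,
    show (("newborn":String) == "newborn") = true from rfl,
    show (("toddler":String) == "newborn") = false from rfl,
    show (("kids":String) == "newborn") = false from rfl,
    show (("teen":String) == "newborn") = false from rfl,
    show (("adult":String) == "toddler") = false from rfl,
    show (("all ages":String) == "toddler") = false from rfl,
    show (("infant":String) == "toddler") = false from rfl,
    show (("newborn":String) == "toddler") = false from rfl,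
    show (("toddler":String) == "toddler") = true from rfl,
    show (("kids":String) == "toddler") = false from rfl,
    show (("teen":String) == "toddler") = false from rfl,
    show (("adult":String) == "kids") = false from rfl,
    show (("all ages":String) == "kids") = false from rfl,
    show (("infant":String) == "kids") = false from rfl,
    show (("newborn":String) == "kids") = false from rfl,
    show (("toddler":String) == "kids") = false from rfl,
    show (("kids":String) == "kids") = true from rfl,
    show (("teen":String) == "kids") = false from rfl,
    show (("adult":String) == "teen") = false from rfl,
    show (("all ages":String) == "teen") = false from rfl,
    show (("infant":String) == "teen") = false from rfl,
    show (("newborn":String) == "teen") = false from rfl,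
    show (("toddler":String) == "teen") = false from rfl,
    show (("kids":String) == "teen") = false from rfl,
    show (("teen":String) == "teen") = true from rfl,
    Bool.false_and, Bool.true_and, Bool.or_false, Bool.false_or]
  by_cases h0 : text = ""
  · simp [h0]; decide
  · rw [if_neg h0]
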